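-- pv_equiv track=rewrite | github.com/gknoy/aoc | aoc_2022/days/day05.py | get_stacks_of_boxes
-- ===== SOURCE A (Python) =====
-- from collections import defaultdict
-- from typing import List
--
-- StackedBoxesType = List[List[str]]
--
-- def get_stacks_of_boxes(box_ascii_art: List[str]) -> StackedBoxesType:
--     # builds stacks in reverse, top-down, then reverse them
--     stacks_by_raw_col = defaultdict(list)
--     for row in box_ascii_art:
--         for col, char in enumerate(row):
--             if char not in "[ ]":
--                 stacks_by_raw_col[col].append(char)
--
--     # go through each raw column's data, and make the proper stacks:
--     return [
--         list(reversed(stacks_by_raw_col[key][:-1]))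
--         for key in sorted(stacks_by_raw_col.keys())
--     ]
-- ===== SOURCE B (Python) =====
-- def get_stacks_of_boxes(box_ascii_art):
--     # column-major single pass: for each column index, collect that column's
--     # non-frame characters directly, drop the label row char, reverse.
--     width = 0
--     for row in box_ascii_art:
--         width = max(width, len(row))
--     stacks = []
--     for j in range(width):
--         filtered = [row[j] for row in box_ascii_art
--                     if j < len(row) and row[j] not in "[ ]"]
--         if filtered:
--             stacks.append(list(reversed(filtered[:-1])))
--     return stacks
-- ===== Notes on version B (the rewrite author's own statement) =====
-- stated objective: simpler
-- what changed: Replaces the defaultdict-accumulate-then-sort-keys structure by a direct column-major pass: compute the max row width once, then for each column index left-to-right gather the column's non-frame characters in one comprehension, skipping empty columns, so the dict and the sort disappear.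
import Mathlib
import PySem

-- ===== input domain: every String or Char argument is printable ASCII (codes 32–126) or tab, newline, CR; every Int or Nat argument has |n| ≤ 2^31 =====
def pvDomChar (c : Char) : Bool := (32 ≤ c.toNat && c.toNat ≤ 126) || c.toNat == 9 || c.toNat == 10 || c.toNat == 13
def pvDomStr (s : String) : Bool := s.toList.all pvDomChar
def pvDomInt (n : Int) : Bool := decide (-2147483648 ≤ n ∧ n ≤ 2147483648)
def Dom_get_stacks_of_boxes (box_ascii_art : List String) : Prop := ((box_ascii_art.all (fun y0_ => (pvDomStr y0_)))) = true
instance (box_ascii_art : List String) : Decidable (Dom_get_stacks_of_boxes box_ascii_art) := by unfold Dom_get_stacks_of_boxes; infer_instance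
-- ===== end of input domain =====

-- B replaces A's defaultdict-then-sorted-keys grouping by a direct column-major pass
-- over column indices 0..max-row-width (objective: simpler; same asymptotic cost).

-- ===== PORT A =====
-- 'char not in "[ ]"' tests a single character against the chars of "[ ]" (exact here).
def get_stacks_of_boxes (box_ascii_art : List String) : List (List String) :=
  let stacks_by_raw_col : PySem.Dict Int (List String) :=
    box_ascii_art.foldl (fun d row =>
      (PySem.List.enumerate row.toList 0).foldl (fun d p =>
        if !("[ ]".toList.contains p.2) then
          d.modify p.1 [] (fun v => v ++ [String.ofList [p.2]])
        else d) d)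
      PySem.Dict.empty
  (PySem.List.sorted stacks_by_raw_col.keys (fun k => k) false).map
    (fun key => (PySem.List.slice (stacks_by_raw_col.getD key []) none (some (-1))).reverse)

-- ===== PORT B =====
def get_stacks_of_boxes_alt (box_ascii_art : List String) : List (List String) :=
  let width : Int := box_ascii_art.foldl (fun w row => max w (PySem.Str.len row)) 0
  (PySem.List.pyRange 0 width 1).foldl (fun acc j =>
    let filtered : List String := box_ascii_art.filterMap (fun row =>
      if j < (PySem.Str.len row)
          && !("[ ]".toList.contains (PySem.List.pyGetD row.toList j ' ')) then
        some (String.ofList [PySem.List.pyGetD row.toList j ' '])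
      else none)
    if !filtered.isEmpty then
      acc ++ [(PySem.List.slice filtered none (some (-1))).reverse]
    else acc) []

-- ===== PRECONDITION & SPEC =====
def Spec_get_stacks_of_boxes (box_ascii_art : List String) (out : List (List String)) : Prop := out = get_stacks_of_boxes_alt box_ascii_art
instance (box_ascii_art : List String) (out : List (List String)) : Decidable (Spec_get_stacks_of_boxes box_ascii_art out) := by unfold Spec_get_stacks_of_boxes; infer_instance

-- ===== CLAIM (what is proved, stated in full; the proofs are below) =====
def Claim_equal_get_stacks_of_boxes : Prop := ∀ (box_ascii_art : List String), Dom_get_stacks_of_boxes box_ascii_art → Spec_get_stacks_of_boxes box_ascii_art (get_stacks_of_boxes box_ascii_art)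

-- ===== LEMMAS AND PROOFS =====

def pvKeep (c : Char) : Bool := !("[ ]".toList.contains c)

def pvG : Int × Char → Option (Int × String) :=
  fun p => if pvKeep p.2 then some (p.1, String.ofList [p.2]) else none

def pvRowPairs (row : String) : List (Int × String) :=
  (PySem.List.enumerate row.toList 0).filterMap pvG

def pvCol (art : List String) (j : Int) : List String :=
  art.flatMap (fun r => ((pvRowPairs r).filter (fun p => p.1 == j)).map (·.2))

def pvStep : PySem.Dict Int (List String) → String → PySem.Dict Int (List String) :=
  fun d row => (PySem.List.enumerate row.toList 0).foldl (fun d p =>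
    if !("[ ]".toList.contains p.2) then
      d.modify p.1 [] (fun v => v ++ [String.ofList [p.2]])
    else d) d

def pvWidth (art : List String) : Int := art.foldl (fun w row => max w (PySem.Str.len row)) 0

def pvFilt (art : List String) (j : Int) : List String :=
  art.filterMap (fun row =>
    if j < PySem.Str.len row && pvKeep (PySem.List.pyGetD row.toList j ' ') then
      some (String.ofList [PySem.List.pyGetD row.toList j ' '])
    else none)

def pvYs (art : List String) : List Int :=
  (PySem.List.pyRange 0 (pvWidth art) 1).filter (fun j => !(pvFilt art j).isEmpty)

lemma pvStep_eq (d : PySem.Dict Int (List String)) (row : String) :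
    pvStep d row = (pvRowPairs row).foldl (fun d p => d.modify p.1 [] (fun v => v ++ [p.2])) d := by
  
  have aux : ∀ (l : List (Int × Char)) (d : PySem.Dict Int (List String)),
      l.foldl (fun d p =>
        if !("[ ]".toList.contains p.2) then
          d.modify p.1 [] (fun v => v ++ [String.ofList [p.2]])
        else d) d
      = (l.filterMap pvG).foldl (fun d p => d.modify p.1 [] (fun v => v ++ [p.2])) d := by
    intro l
    induction l with
    | nil => intro d; rfl
    | cons p l ih =>
      intro d
      rw [List.foldl_cons, List.filterMap_cons]
      by_cases h : ("[ ]".toList.contains p.2) = true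
      · have h' : p.2 = '[' ∨ p.2 = ' ' ∨ p.2 = ']' := by simpa using h
        have hg : pvG p = none := by
          simp only [pvG]
          rw [if_neg (by simp [pvKeep]; tauto)]
        rw [hg, if_neg (by simp; tauto)]
        exact ih _
      · have h' : ¬(p.2 = '[' ∨ p.2 = ' ' ∨ p.2 = ']') := by simpa using h
        have hg : pvG p = some (p.1, String.ofList [p.2]) := by
          simp only [pvG]
          rw [if_pos (by simp [pvKeep]; tauto)]
        rw [hg, if_pos (by simp; tauto), List.foldl_cons]
        exact ih _
  simpa [pvStep, pvRowPairs] using aux (PySem.List.enumerate row.toList 0) d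

lemma pv_getD_fold (art : List String) : ∀ (d : PySem.Dict Int (List String)) (j : Int),
    (art.foldl pvStep d).getD j [] = d.getD j [] ++ pvCol art j := by
  
  induction art with
  | nil => intro d j; simp [pvCol]
  | cons r art ih =>
    intro d j
    simp only [List.foldl_cons]
    rw [ih, pvStep_eq, PySem.Dict.getD_foldl_modify_append]
    simp [pvCol, List.flatMap_cons]

lemma pv_mem_keys_fold (art : List String) : ∀ (d : PySem.Dict Int (List String)) (j : Int),
    j ∈ (art.foldl pvStep d).keys ↔ j ∈ d.keys ∨ pvCol art j ≠ [] := by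
  
  induction art with
  | nil => intro d j; simp [pvCol]
  | cons r art ih =>
    intro d j
    simp only [List.foldl_cons]
    rw [ih, pvStep_eq, PySem.Dict.keys_foldl_modify_key]
    rw [PySem.Set.mem_update]
    have hmem : j ∈ (pvRowPairs r).map (·.1) ↔
        ((pvRowPairs r).filter (fun p => p.1 == j)).map (·.2) ≠ [] := by
      simp only [List.mem_map, ne_eq, List.map_eq_nil_iff, List.filter_eq_nil_iff]
      push Not
      constructor
      · rintro ⟨p, hp, hpj⟩; exact ⟨p, hp, by simp [hpj]⟩
      · rintro ⟨p, hp, hpj⟩; exact ⟨p, hp, by simpa using hpj⟩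
    have hcol : pvCol (r :: art) j ≠ [] ↔
        ((pvRowPairs r).filter (fun p => p.1 == j)).map (·.2) ≠ [] ∨ pvCol art j ≠ [] := by
      simp only [pvCol, List.flatMap_cons, ne_eq, List.append_eq_nil_iff]
      tauto
    rw [hcol, ← hmem]
    tauto

lemma pv_nodup_keys_fold (art : List String) : ∀ (d : PySem.Dict Int (List String)),
    d.keys.Nodup → (art.foldl pvStep d).keys.Nodup := by
  
  induction art with
  | nil => intro d h; simpa using h
  | cons r art ih =>
    intro d h
    simp only [List.foldl_cons]
    apply ih
    rw [pvStep_eq]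
    exact PySem.Dict.nodup_keys_foldl_modify_key _ _ _ _ _ h

lemma pv_enum_filter (cs : List Char) : ∀ (s j : Int),
    (PySem.List.enumerate cs s).filter (fun p => p.1 == j) =
      if s ≤ j ∧ j < s + cs.length then [(j, cs.getD (j - s).toNat ' ')] else [] := by
  
  induction cs with
  | nil =>
    intro s j
    rw [PySem.List.enumerate_nil]
    simp only [List.filter_nil, List.length_nil]
    rw [if_neg (by omega)]
  | cons c cs ih =>
    intro s j
    rw [PySem.List.enumerate_cons]
    simp only [List.filter_cons, List.length_cons]
    by_cases h : s = j
    · subst h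
      rw [if_pos (by simp)]
      rw [ih, if_neg (by omega), if_pos (by push_cast; omega)]
      simp
    · rw [if_neg (by simp [h]), ih]
      by_cases h2 : s + 1 ≤ j ∧ j < s + 1 + (cs.length : Int)
      · rw [if_pos h2, if_pos (by push_cast; omega)]
        have hn : (j - s).toNat = (j - (s + 1)).toNat + 1 := by omega
        simp [hn]
      · rw [if_neg h2, if_neg (by push_cast; omega)]

lemma pv_filter_filterMap (l : List (Int × Char)) (j : Int) :
    (l.filterMap pvG).filter (fun q => q.1 == j) = (l.filter (fun p => p.1 == j)).filterMap pvG := by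
  induction l with
  | nil => rfl
  | cons p l ih =>
    by_cases hk : pvKeep p.2 = true
    · have hg : pvG p = some (p.1, String.ofList [p.2]) := by
        simp only [pvG]; rw [if_pos hk]
      by_cases hj2 : p.1 = j
      · rw [List.filterMap_cons, hg, List.filter_cons, List.filter_cons,
            if_pos (by simpa using hj2), if_pos (by simpa using hj2),
            List.filterMap_cons, hg, ih]
      · rw [List.filterMap_cons, hg, List.filter_cons, List.filter_cons,
            if_neg (by simpa using hj2), if_neg (by simpa using hj2), ih]
    · have hg : pvG p = none := by
        simp only [pvG]; rw [if_neg hk]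
      rw [List.filterMap_cons, hg, List.filter_cons]
      by_cases hj2 : p.1 = j
      · rw [if_pos (by simpa using hj2), List.filterMap_cons, hg, ih]
      · rw [if_neg (by simpa using hj2), ih]

lemma pv_row_filt (r : String) (j : Int) (hj : 0 ≤ j) :
    ((pvRowPairs r).filter (fun p => p.1 == j)).map (·.2) =
      if j < PySem.Str.len r && pvKeep (PySem.List.pyGetD r.toList j ' ') then
        [String.ofList [PySem.List.pyGetD r.toList j ' ']]
      else [] := by
  have hget := PySem.List.pyGetD_of_nonneg r.toList ' ' hj
  have hlen := PySem.Str.len_eq r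
  unfold pvRowPairs
  rw [pv_filter_filterMap, pv_enum_filter, hget]
  by_cases h : j < PySem.Str.len r
  · rw [if_pos (by rw [hlen] at h; omega)]
    have hj0 : j - 0 = j := by omega
    rw [hj0]
    by_cases hk : pvKeep (r.toList.getD j.toNat ' ') = true
    · have hg : pvG (j, r.toList.getD j.toNat ' ') = some (j, String.ofList [r.toList.getD j.toNat ' ']) := by
        simp only [pvG]; rw [if_pos hk]
      rw [if_pos (by rw [Bool.and_eq_true, decide_eq_true_eq]; exact ⟨h, hk⟩)]
      rw [List.filterMap_cons, hg]
      rfl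
    · have hg : pvG (j, r.toList.getD j.toNat ' ') = none := by
        simp only [pvG]; rw [if_neg hk]
      rw [if_neg (by rw [Bool.and_eq_true, decide_eq_true_eq]; rintro ⟨-, hk2⟩; exact hk hk2)]
      rw [List.filterMap_cons, hg]
      rfl
  · rw [if_neg (by rw [hlen] at h; omega),
       if_neg (by rw [Bool.and_eq_true, decide_eq_true_eq]; rintro ⟨h2, -⟩; exact h h2)]
    rfl

lemma pv_filt_eq_col (art : List String) (j : Int) (hj : 0 ≤ j) : pvFilt art j = pvCol art j := by
  induction art with
  | nil => rfl
  | cons r art ih =>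
    simp only [pvFilt, pvCol, List.filterMap_cons, List.flatMap_cons] at ih ⊢
    rw [pv_row_filt r j hj]
    by_cases h : (j < PySem.Str.len r && pvKeep (PySem.List.pyGetD r.toList j ' ')) = true
    · rw [if_pos h, if_pos h]
      simp only [List.singleton_append]
      rw [ih]
    · rw [if_neg h, if_neg h]
      simp only [List.nil_append]
      exact ih

lemma pv_col_bounds (art : List String) (j : Int) (h : pvCol art j ≠ []) :
    0 ≤ j ∧ j < pvWidth art := by
  
  obtain ⟨x, hx⟩ := List.exists_mem_of_ne_nil _ h
  simp only [pvCol, List.mem_flatMap] at hx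
  obtain ⟨r, hr, hxr⟩ := hx
  obtain ⟨p, hp, -⟩ := List.exists_of_mem_map hxr
  have hpj : p.1 = j := by simpa using List.of_mem_filter hp
  have hpmem : p ∈ pvRowPairs r := List.mem_of_mem_filter hp
  simp only [pvRowPairs, List.mem_filterMap] at hpmem
  obtain ⟨q, hq, hgq⟩ := hpmem
  have hq1 : q.1 = j := by
    simp only [pvG] at hgq
    split at hgq
    · cases hgq; simpa using hpj
    · cases hgq
  rw [PySem.List.mem_enumerate_iff] at hq
  obtain ⟨k, hk, rfl⟩ := hq
  simp only [zero_add] at hq1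
  have hw : PySem.Str.len r ≤ pvWidth art := by
    exact (PySem.List.le_foldl_max_int art (fun row => PySem.Str.len row) 0).2 r hr
  have hlen : PySem.Str.len r = (r.toList.length : Int) := by simp [PySem.Str.len_eq]
  constructor
  · omega
  · have : (k : Int) < (r.toList.length : Int) := by exact_mod_cast hk
    omega

lemma pv_sorted_keys (art : List String) :
    PySem.List.sorted (art.foldl pvStep PySem.Dict.empty).keys (fun k => k) false = pvYs art := by
  
  have hw0 : ∀ a b : Int, (PySem.List.pyRange a b 1).Pairwise (· < ·) := by
    intro a b
    have key : ∀ (n : Nat) (a b : Int), (b - a).toNat = n → (PySem.List.pyRange a b 1).Pairwise (· < ·) := by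
      intro n
      induction n with
      | zero =>
        intro a b hn0
        have hnil : PySem.List.pyRange a b 1 = [] := by
          apply List.eq_nil_iff_forall_not_mem.mpr
          intro x hx
          have := PySem.List.mem_pyRange_one.1 hx
          omega
        rw [hnil]
        exact List.Pairwise.nil
      | succ m ih =>
        intro a b hn
        by_cases hab : a < b
        · rw [PySem.List.pyRange_one_cons hab]
          refine List.Pairwise.cons ?_ (ih (a + 1) b (by omega))
          intro x hx
          have := PySem.List.mem_pyRange_one.1 hx
          omega
        · have hnil : PySem.List.pyRange a b 1 = [] := by
            apply List.eq_nil_iff_forall_not_mem.mpr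
            intro x hx
            have := PySem.List.mem_pyRange_one.1 hx
            omega
          rw [hnil]
          exact List.Pairwise.nil
    exact key (b - a).toNat a b rfl
  have hys_pw : (pvYs art).Pairwise (· < ·) := by
    exact List.Pairwise.sublist List.filter_sublist (hw0 0 (pvWidth art))
  apply PySem.List.sorted_eq_of_perm_of_pairwise_lt
  · rw [List.perm_ext_iff_of_nodup (hys_pw.nodup) (pv_nodup_keys_fold art _ (by simp [PySem.Dict.empty]))]
    intro j
    rw [pv_mem_keys_fold]
    simp only [pvYs, List.mem_filter, PySem.List.mem_pyRange_one, Bool.not_eq_eq_eq_not,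
      Bool.not_true, List.isEmpty_eq_false_iff, ne_eq]
    constructor
    · rintro ⟨⟨h0, hw⟩, hne⟩
      right
      rw [← pv_filt_eq_col art j h0]
      exact hne
    · rintro (hk | hc)
      · exfalso; revert hk; simp [PySem.Dict.empty]
      · have hb := pv_col_bounds art j hc
        refine ⟨⟨hb.1, hb.2⟩, ?_⟩
        rw [pv_filt_eq_col art j hb.1]
        exact hc
  · exact hys_pw.imp (fun h => h)

lemma pv_B_eq (art : List String) :
    get_stacks_of_boxes_alt art =
      (pvYs art).map (fun j => (PySem.List.slice (pvFilt art j) none (some (-1))).reverse) := by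
  
  show (PySem.List.pyRange 0 (pvWidth art) 1).foldl (fun acc j =>
      if !(pvFilt art j).isEmpty then
        acc ++ [(PySem.List.slice (pvFilt art j) none (some (-1))).reverse]
      else acc) [] = _
  rw [PySem.List.foldl_append_if]
  simp [pvYs]

lemma pv_A_eq (art : List String) :
    get_stacks_of_boxes art =
      (PySem.List.sorted (art.foldl pvStep PySem.Dict.empty).keys (fun k => k) false).map
        (fun k => (PySem.List.slice (pvCol art k) none (some (-1))).reverse) := by
  
  show (PySem.List.sorted (art.foldl pvStep PySem.Dict.empty).keys (fun k => k) false).map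
      (fun key => (PySem.List.slice ((art.foldl pvStep PySem.Dict.empty).getD key []) none (some (-1))).reverse) = _
  apply List.map_congr_left
  intro k _
  rw [pv_getD_fold]
  rw [show (PySem.Dict.empty : PySem.Dict Int (List String)).getD k [] = [] from rfl]
  rw [List.nil_append]

-- ===== VERDICT (by name: the statement is the Claim_ definition above) =====
theorem get_stacks_of_boxes_spec : Claim_equal_get_stacks_of_boxes := by
  intro art _
  show get_stacks_of_boxes art = get_stacks_of_boxes_alt art
  rw [pv_A_eq, pv_sorted_keys, pv_B_eq]
  apply List.map_congr_left
  intro j hj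
  have hj0 : 0 ≤ j := by
    have hmem := List.mem_of_mem_filter hj
    exact ((PySem.List.mem_pyRange_one).1 (by simpa [pvYs] using hmem)).1
  rw [pv_filt_eq_col art j hj0]
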